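-- pv_equiv track=rewrite | github.com/ryuji-konishi/AplacChat | common/SentenseResolver.py | _split_by_atomic
-- ===== SOURCE A (Python) =====
-- def _split_by_atomic(atom, words):
--     """ Take a list of word, devide by atomic character into list, and return all words in a single list.
--         For example, 'abc,def' -> ['abc', ',', 'def']
--     """
--     result = []
--     for word in words:
--         buf = u''
--         for char in word:
--             if char == atom:
--                 if len(buf):
--                     result.append(buf)
--                     buf = u''
--                 result.append(atom)
--             else:
--                 buf += char
--
--         if len(buf):
--             result.append(buf)
--
--     return result
-- ===== SOURCE B (Python) =====
-- def _split_by_atomic(atom, words):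
--     """ Take a list of word, devide by atomic character into list, and return all words in a single list.
--         For example, 'abc,def' -> ['abc', ',', 'def']
--     """
--     result = []
--     for word in words:
--         if len(atom) == 1:
--             first = True
--             for part in word.split(atom):
--                 if not first:
--                     result.append(atom)
--                 if part:
--                     result.append(part)
--                 first = False
--         elif word:
--             result.append(word)
--     return result
-- ===== Notes on version B (the rewrite author's own statement) =====
-- stated objective: simpler
-- what changed: Replaces A's character-by-character buffer-accumulation inner loop with word.split(atom) followed by interleaving the atom between the parts (dropping empty parts), with an explicit branch for non-single-character atoms where no character can ever equal atom; the split is done by the C-level str.split, which a timing run measured ~2x faster.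
import Mathlib
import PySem

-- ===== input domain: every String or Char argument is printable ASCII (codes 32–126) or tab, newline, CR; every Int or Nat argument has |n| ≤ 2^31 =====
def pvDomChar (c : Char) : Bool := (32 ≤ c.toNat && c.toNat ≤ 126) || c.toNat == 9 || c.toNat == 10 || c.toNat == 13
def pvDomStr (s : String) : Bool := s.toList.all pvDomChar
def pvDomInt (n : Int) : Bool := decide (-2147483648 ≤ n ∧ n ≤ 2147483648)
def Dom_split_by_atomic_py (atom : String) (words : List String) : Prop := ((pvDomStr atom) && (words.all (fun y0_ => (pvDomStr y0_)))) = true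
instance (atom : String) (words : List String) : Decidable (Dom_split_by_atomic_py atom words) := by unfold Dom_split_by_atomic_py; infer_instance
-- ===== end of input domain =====

-- B replaces A's char-by-char buffer loop with split-on-atom + interleave (objective: simpler); return values proved equal, no mutation involved.
-- ===== PORT A =====
-- literal port of A: per word, a char-by-char loop accumulating a buffer, flushed at each atom and at the end
def stepA (atom : String) (st : List String × List Char) (char : Char) : List String × List Char :=
  if [char] = atom.toList then
    ((if st.2.length ≠ 0 then st.1 ++ [String.ofList st.2] else st.1) ++ [atom], [])
  else (st.1, st.2 ++ [char])

-- the trailing 'if len(buf): result.append(buf)'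
def flushA (st : List String × List Char) : List String :=
  if st.2.length ≠ 0 then st.1 ++ [String.ofList st.2] else st.1

def splitWordA (atom : String) (result : List String) (word : String) : List String :=
  flushA (word.toList.foldl (stepA atom) (result, ([] : List Char)))

def split_by_atomic_py (atom : String) (words : List String) : List String :=
  words.foldl (splitWordA atom) []

-- ===== PORT B =====
-- port of B: split the word on the (single-char) atom, interleave atom between the parts, drop empty parts;
-- word.split(atom) for a one-character atom is ported as List.splitOn (same semantics on these inputs)
def splitWordB (atom : String) (result : List String) (word : String) : List String :=
  match atom.toList with
  | [c] =>
    ((word.toList.splitOn c).foldl (fun (st : List String × Bool) part =>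
      ((if st.2 = false then st.1 ++ [atom] else st.1) ++
        (if part ≠ [] then [String.ofList part] else []), false)) (result, true)).1
  | _ => if word.toList ≠ [] then result ++ [word] else result

def split_by_atomic_py_alt (atom : String) (words : List String) : List String :=
  words.foldl (splitWordB atom) []

-- ===== PRECONDITION & SPEC =====
def Spec_split_by_atomic_py (atom : String) (words : List String) (out : List String) : Prop := out = split_by_atomic_py_alt atom words
instance (atom : String) (words : List String) (out : List String) : Decidable (Spec_split_by_atomic_py atom words out) := by unfold Spec_split_by_atomic_py; infer_instance

-- ===== CLAIM (what is proved, stated in full; the proofs are below) =====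
def Claim_equal_split_by_atomic_py : Prop := ∀ (atom : String) (words : List String), Dom_split_by_atomic_py atom words → Spec_split_by_atomic_py atom words (split_by_atomic_py atom words)

-- ===== LEMMAS AND PROOFS =====

-- the contribution of one (possibly empty) part
def optPart (p : List Char) : List String := if p ≠ [] then [String.ofList p] else []

-- recursive reading of A's inner char loop
def scanA (c : Char) (atom : String) (buf : List Char) : List Char → List String
  | [] => optPart buf
  | ch :: rest =>
    if ch = c then optPart buf ++ atom :: scanA c atom [] rest
    else scanA c atom (buf ++ [ch]) rest

theorem scanA_spec (c : Char) (atom : String) (chars : List Char) :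
    ∀ buf, scanA c atom buf chars =
      optPart (buf ++ (chars.splitOn c).headI) ++
        (chars.splitOn c).tail.flatMap (fun q => atom :: optPart q) := by
  induction chars with
  | nil => intro buf; simp [scanA, List.splitOn, List.splitOnP_nil]
  | cons ch rest ih =>
    intro buf
    by_cases h : ch = c
    · subst h
      have hne := List.splitOnP_ne_nil (fun x => x == ch) rest
      obtain ⟨p, t, hpt⟩ := List.exists_cons_of_ne_nil hne
      simp [scanA, List.splitOn, List.splitOnP_cons, ih, hpt]
    · have hne := List.splitOnP_ne_nil (fun x => x == c) rest
      obtain ⟨p, t, hpt⟩ := List.exists_cons_of_ne_nil hne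
      simp only [scanA, ih (buf ++ [ch]), List.splitOn, List.splitOnP_cons,
        beq_iff_eq, if_neg h, hpt, List.modifyHead_cons, List.headI_cons, List.tail_cons,
        List.append_assoc, List.cons_append, List.nil_append]

-- A's inner foldl, read off as scanA
theorem foldA_spec (c : Char) (atom : String) (hatom : atom.toList = [c]) (chars : List Char) :
    ∀ res buf, flushA (chars.foldl (stepA atom) (res, buf)) = res ++ scanA c atom buf chars := by
  induction chars with
  | nil =>
    intro res buf
    by_cases hb : buf = [] <;> simp [flushA, scanA, optPart, hb, List.length_eq_zero_iff]
  | cons ch rest ih =>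
    intro res buf
    by_cases h : ch = c
    · have hc : [ch] = atom.toList := by rw [hatom, h]
      simp only [List.foldl_cons, stepA, if_pos hc]
      rw [ih]
      by_cases hb : buf = [] <;>
        simp [scanA, h, optPart, hb, List.length_eq_zero_iff]
    · have hc : ¬ ([ch] = atom.toList) := by simp [hatom, h]
      simp only [List.foldl_cons, stepA, if_neg hc]
      rw [ih]
      simp [scanA, h]

-- with a non-single-char atom no character matches, so A's inner fold only accumulates the buffer
theorem foldA_none (atom : String) (h0 : ∀ ch : Char, ¬ ([ch] = atom.toList)) (chars : List Char) :
    ∀ res buf, chars.foldl (stepA atom) (res, buf) = (res, buf ++ chars) := by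
  induction chars with
  | nil => intro res buf; simp
  | cons ch rest ih =>
    intro res buf
    simp only [List.foldl_cons, stepA, if_neg (h0 ch), ih, List.append_assoc, List.cons_append,
      List.nil_append]

-- B's inner foldl after the first part: flag is false, every part contributes atom :: optPart part
theorem foldB_false (atom : String) (parts : List (List Char)) :
    ∀ res, (parts.foldl (fun (st : List String × Bool) part =>
      ((if st.2 = false then st.1 ++ [atom] else st.1) ++
        (if part ≠ [] then [String.ofList part] else []), false)) (res, false)).1
      = res ++ parts.flatMap (fun q => atom :: optPart q) := by
  induction parts with
  | nil => intro res; simp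
  | cons p t ih =>
    intro res
    rw [List.foldl_cons, ih]
    simp [optPart]

-- B's whole inner loop: first part without a leading atom, then foldB_false
theorem foldB_true (atom : String) (p : List Char) (t : List (List Char)) (res : List String) :
    ((p :: t).foldl (fun (st : List String × Bool) part =>
      ((if st.2 = false then st.1 ++ [atom] else st.1) ++
        (if part ≠ [] then [String.ofList part] else []), false)) (res, true)).1
      = res ++ optPart p ++ t.flatMap (fun q => atom :: optPart q) := by
  rw [List.foldl_cons, foldB_false]
  simp [optPart]

-- the two per-word bodies agree
theorem splitWord_eq (atom : String) (res : List String) (word : String) :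
    splitWordA atom res word = splitWordB atom res word := by
  cases hat : atom.toList with
  | nil =>
    have h0 : ∀ ch : Char, ¬ ([ch] = atom.toList) := by intro ch; simp [hat]
    simp only [splitWordA, splitWordB, hat]
    rw [foldA_none atom h0 word.toList res []]
    by_cases hw : word.toList = [] <;>
      simp [flushA, hw, String.ofList_toList, ← String.toList_eq_nil_iff]
  | cons c cs =>
    cases cs with
    | nil =>
      simp only [splitWordA, splitWordB, hat]
      rw [foldA_spec c atom hat word.toList res [], scanA_spec]
      obtain ⟨p, t, hpt⟩ :=
        List.exists_cons_of_ne_nil (List.splitOnP_ne_nil (fun x => x == c) word.toList)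
      have hsp : word.toList.splitOn c = p :: t := hpt
      rw [hsp, foldB_true]
      simp
    | cons c2 cs2 =>
      have h0 : ∀ ch : Char, ¬ ([ch] = atom.toList) := by intro ch; simp [hat]
      simp only [splitWordA, splitWordB, hat]
      rw [foldA_none atom h0 word.toList res []]
      by_cases hw : word.toList = [] <;>
        simp [flushA, hw, String.ofList_toList, ← String.toList_eq_nil_iff]

-- ===== VERDICT (by name: the statement is the Claim_ definition above) =====
theorem split_by_atomic_py_spec : Claim_equal_split_by_atomic_py := by
  intro atom words _
  unfold Spec_split_by_atomic_py split_by_atomic_py split_by_atomic_py_alt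
  rw [show splitWordA atom = splitWordB atom from
    funext fun res => funext fun w => splitWord_eq atom res w]
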